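-- pv_equiv track=rewrite | github.com/joshuar500/stiffed-api | server/app/validators.py | valid_request_json
-- ===== SOURCE A (Python) =====
-- def valid_request_json(request_json, required_params, optional_params=[]):
--     if request_json == None:
--         return False
--
--     copy_json = request_json.copy()
--     for key in required_params:
--         if key not in request_json:
--             return False
--         copy_json.pop(key)
--
--     optional_len = len(optional_params)
--     if optional_len >= 1 and len(copy_json) > optional_len:
--         return False
--
--     for rkey in copy_json:
--         if rkey not in optional_params:
--             return False
--
--     return True
-- ===== SOURCE B (Python) =====
-- def valid_request_json(request_json, required_params, optional_params=[]):
--     if request_json == None: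
--         return False
--     keys = set(request_json)
--     required = set(required_params)
--     return required <= keys and keys <= required | set(optional_params)
-- ===== Notes on version B (the rewrite author's own statement) =====
-- stated objective: simpler
-- what changed: Replaces the copy-and-pop loop, the (provably redundant) length guard and the membership loop over the popped copy by two set-inclusion checks on the key sets.
-- crash fix: When required_params repeats a key that is present in request_json before any missing required key, A raises KeyError on the second pop of the copy; B returns the set-inclusion verdict (True at the witness). — e.g. on valid_request_json(some [("a", 1)], ["a", "a"], []): A raises KeyError, B returns true
import Mathlib
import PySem

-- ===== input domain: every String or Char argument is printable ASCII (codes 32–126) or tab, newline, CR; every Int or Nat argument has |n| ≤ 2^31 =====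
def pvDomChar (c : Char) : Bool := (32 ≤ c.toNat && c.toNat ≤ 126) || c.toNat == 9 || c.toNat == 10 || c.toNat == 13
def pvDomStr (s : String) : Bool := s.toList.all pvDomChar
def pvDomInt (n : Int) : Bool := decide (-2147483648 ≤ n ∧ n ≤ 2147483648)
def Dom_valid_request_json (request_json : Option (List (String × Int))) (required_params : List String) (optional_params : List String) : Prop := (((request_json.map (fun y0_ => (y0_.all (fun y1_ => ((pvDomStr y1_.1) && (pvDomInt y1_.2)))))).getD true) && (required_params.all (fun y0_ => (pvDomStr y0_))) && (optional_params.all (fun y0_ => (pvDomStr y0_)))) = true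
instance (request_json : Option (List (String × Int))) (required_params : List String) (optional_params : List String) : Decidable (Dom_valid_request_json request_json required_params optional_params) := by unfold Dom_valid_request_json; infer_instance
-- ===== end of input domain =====

-- B replaces A's copy-and-pop loop, redundant length guard and membership loop by two set inclusions; equivalence is about the return value (A mutates only its private copy).

-- ===== PORT A =====
-- the 'for key in required_params' loop: none = KeyError from copy_json.pop (excluded by Pre_),
-- some none = early 'return False', some (some copy) = loop finished with the popped copy
def vrjLoop (orig : PySem.Dict String Int) : List String → PySem.Dict String Int → Option (Option (PySem.Dict String Int))
  | [], copy_json => some (some copy_json)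
  | key :: rest, copy_json =>
    if orig.contains key then
      match copy_json.pop? key with
      | some (_, copy') => vrjLoop orig rest copy'
      | none => none
    else some none

def valid_request_json (request_json : Option (List (String × Int))) (required_params : List String) (optional_params : List String) : Bool :=
  match request_json with
  | none => false
  | some pairs =>
    let request := PySem.Dict.ofList pairs
    match vrjLoop request required_params request with
    | none => false   -- Python raises KeyError here; these inputs are outside Pre_
    | some none => false
    | some (some copy_json) =>
      let optional_len := optional_params.length
      if 1 ≤ optional_len ∧ copy_json.size > optional_len then false
      else copy_json.keys.all (fun rkey => optional_params.contains rkey)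

-- ===== PORT B =====
def valid_request_json_alt (request_json : Option (List (String × Int))) (required_params : List String) (optional_params : List String) : Bool :=
  match request_json with
  | none => false
  | some pairs =>
    let keys : PySem.Set String := PySem.Set.ofList (pairs.map Prod.fst)
    let required : PySem.Set String := PySem.Set.ofList required_params
    PySem.Set.issubset required keys && PySem.Set.issubset keys (PySem.Set.union required (PySem.Set.ofList optional_params))

-- ===== PRECONDITION & SPEC =====
-- Pre_ excludes exactly the inputs where Python A raises KeyError: required_params repeats a
-- key of request_json before any missing required key, so the second pop on the copy fails.
def Pre_valid_request_json (request_json : Option (List (String × Int))) (required_params : List String) (optional_params : List String) : Prop :=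
  ∀ pairs, request_json = some pairs →
    (required_params.takeWhile (fun k => (pairs.map Prod.fst).contains k)).Nodup

instance (request_json : Option (List (String × Int))) (required_params : List String) (optional_params : List String) : Decidable (Pre_valid_request_json request_json required_params optional_params) := by
  unfold Pre_valid_request_json
  cases request_json with
  | none => exact isTrue (by simp)
  | some ps => exact decidable_of_iff ((required_params.takeWhile (fun k => (ps.map Prod.fst).contains k)).Nodup) (by simp)

def pvWitness_valid_request_json : (Option (List (String × Int))) × List String × List String :=
  (some [("a", 1)], ["a"], ["b"])

-- When required_params repeats a key of request_json before any missing required key, Python A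
-- raises KeyError on the second pop of the copy; B returns the set-inclusion verdict instead.
def Raises_valid_request_json (request_json : Option (List (String × Int))) (required_params : List String) (optional_params : List String) : Prop :=
  ∃ pairs, request_json = some pairs ∧
    ¬ (required_params.takeWhile (fun k => (pairs.map Prod.fst).contains k)).Nodup

instance (request_json : Option (List (String × Int))) (required_params : List String) (optional_params : List String) : Decidable (Raises_valid_request_json request_json required_params optional_params) := by
  unfold Raises_valid_request_json
  cases request_json with
  | none => exact isFalse (by simp)
  | some ps => exact decidable_of_iff (¬ (required_params.takeWhile (fun k => (ps.map Prod.fst).contains k)).Nodup) (by simp)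

def pvRaiseWitness_valid_request_json : (Option (List (String × Int))) × List String × List String :=
  (some [("a", 1)], ["a", "a"], [])

def pvRaiseWitnessOut_valid_request_json : Bool := true

def Spec_valid_request_json (request_json : Option (List (String × Int))) (required_params : List String) (optional_params : List String) (out : Bool) : Prop := out = valid_request_json_alt request_json required_params optional_params
instance (request_json : Option (List (String × Int))) (required_params : List String) (optional_params : List String) (out : Bool) : Decidable (Spec_valid_request_json request_json required_params optional_params out) := by unfold Spec_valid_request_json; infer_instance

-- ===== CLAIM (what is proved, stated in full; the proofs are below) =====
def Claim_equal_valid_request_json : Prop := ∀ (request_json : Option (List (String × Int))) (required_params : List String) (optional_params : List String), Dom_valid_request_json request_json required_params optional_params → Pre_valid_request_json request_json required_params optional_params → Spec_valid_request_json request_json required_params optional_params (valid_request_json request_json required_params optional_params)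

def Claim_raises_valid_request_json : Prop := (∀ (request_json : Option (List (String × Int))) (required_params : List String) (optional_params : List String), Dom_valid_request_json request_json required_params optional_params → Raises_valid_request_json request_json required_params optional_params → ¬ Pre_valid_request_json request_json required_params optional_params) ∧ (Dom_valid_request_json (pvRaiseWitness_valid_request_json.1) (pvRaiseWitness_valid_request_json.2.1) (pvRaiseWitness_valid_request_json.2.2) ∧ Raises_valid_request_json (pvRaiseWitness_valid_request_json.1) (pvRaiseWitness_valid_request_json.2.1) (pvRaiseWitness_valid_request_json.2.2) ∧ valid_request_json_alt (pvRaiseWitness_valid_request_json.1) (pvRaiseWitness_valid_request_json.2.1) (pvRaiseWitness_valid_request_json.2.2) = pvRaiseWitnessOut_valid_request_json)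

-- ===== LEMMAS AND PROOFS =====

-- erasing one more key from a filtered copy is one combined filter
theorem vrj_filter_erase (items : List (String × Int)) (done : List String) (key : String) :
    ((items.filter (fun p => !done.contains p.1)).filter (fun p => !(p.1 == key))) =
      items.filter (fun p => !(done ++ [key]).contains p.1) := by
  rw [List.filter_filter]
  apply List.filter_congr
  intro p _
  simp only [List.contains_append, List.contains_cons, List.contains_nil, Bool.or_false,
    Bool.not_or, Bool.and_comm]

-- characterisation of A's required-params loop, generalising over the keys already popped
theorem vrjLoop_eq (d : PySem.Dict String Int) (req : List String) :
    ∀ done : List String,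
      (done ++ req.takeWhile (fun k => d.contains k)).Nodup →
      vrjLoop d req ⟨d.items.filter (fun p => !done.contains p.1)⟩ =
        (if req.all (fun k => d.contains k)
         then some (some ⟨d.items.filter (fun p => !(done ++ req).contains p.1)⟩)
         else some none) := by
  induction req with
  | nil => intro done _; simp [vrjLoop]
  | cons key rest ih =>
    intro done hnd
    by_cases hk : d.contains key = true
    · have htw : (key :: rest).takeWhile (fun k => d.contains k) =
          key :: rest.takeWhile (fun k => d.contains k) := by
        simp [hk]
      rw [htw] at hnd
      -- key is a key of d and not yet popped, so pop? succeeds on the copy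
      have hknotdone : key ∉ done := by
        intro hmem
        exact List.disjoint_left.mp (List.disjoint_of_nodup_append hnd) hmem List.mem_cons_self
      have hkeys : key ∈ d.keys := by
        have := PySem.Dict.contains_eq_decide_mem_keys d key
        rw [this] at hk; simpa using hk
      obtain ⟨v, hv⟩ : ∃ p, p ∈ d.items ∧ p.1 = key := by
        simp only [PySem.Dict.keys, List.mem_map] at hkeys
        obtain ⟨p, hp, hp1⟩ := hkeys
        exact ⟨p, hp, hp1⟩
      have hcontains : (PySem.Dict.mk (d.items.filter (fun p => !done.contains p.1))).contains key = true := by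
        rw [PySem.Dict.contains_mk, List.any_eq_true]
        refine ⟨v, List.mem_filter.mpr ⟨hv.1, ?_⟩, by simp [hv.2]⟩
        rw [hv.2]
        simpa using hknotdone
      have hget := PySem.Dict.contains_eq_isSome_get?
        (PySem.Dict.mk (d.items.filter (fun p => !done.contains p.1))) key
      rw [hcontains] at hget
      obtain ⟨w, hw⟩ := Option.isSome_iff_exists.mp hget.symm
      have hpop : (PySem.Dict.mk (d.items.filter (fun p => !done.contains p.1))).pop? key =
          some (w, (PySem.Dict.mk (d.items.filter (fun p => !done.contains p.1))).erase key) := by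
        simp only [PySem.Dict.pop?]
        rw [hw]
        rfl
      have herase : (PySem.Dict.mk (d.items.filter (fun p => !done.contains p.1))).erase key =
          PySem.Dict.mk (d.items.filter (fun p => !(done ++ [key]).contains p.1)) := by
        simp only [PySem.Dict.erase]
        exact congrArg PySem.Dict.mk (vrj_filter_erase d.items done key)
      have hnd' : ((done ++ [key]) ++ rest.takeWhile (fun k => d.contains k)).Nodup := by
        simpa [List.append_assoc] using hnd
      have hstep : vrjLoop d (key :: rest) ⟨d.items.filter (fun p => !done.contains p.1)⟩ =
          vrjLoop d rest ⟨d.items.filter (fun p => !(done ++ [key]).contains p.1)⟩ := by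
        simp only [vrjLoop]
        rw [if_pos hk, hpop, herase]
      rw [hstep, ih (done ++ [key]) hnd']
      simp only [List.all_cons, hk, Bool.true_and, List.append_assoc, List.singleton_append]
    · simp [vrjLoop, hk]

-- keys of the dict built from the pairs list = set(pairs keys)
theorem vrj_keys_ofList (pairs : List (String × Int)) :
    (PySem.Dict.ofList pairs).keys = PySem.Set.ofList (pairs.map Prod.fst) := by
  have h := PySem.Dict.keys_foldl_insert_key (ν := Int) pairs Prod.fst (fun _ x => x.2) PySem.Dict.empty
  simpa [PySem.Dict.ofList, PySem.Dict.update, PySem.Set.ofList, PySem.Set.update,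
    PySem.Dict.keys_empty, PySem.Set.empty] using h

-- membership phrasing of List.contains on strings
theorem vrj_contains_iff (l : List String) (x : String) : l.contains x = true ↔ x ∈ l := by
  simp

-- the popped copy's key list, with the filter pushed through the map
theorem vrj_keys_filter (items : List (String × Int)) (q : String → Bool) :
    (PySem.Dict.mk (items.filter (fun p => q p.1))).keys = (items.map Prod.fst).filter q := by
  simp only [PySem.Dict.keys]
  rw [List.filter_map]
  rfl

theorem valid_request_json_spec : Claim_equal_valid_request_json := by
  intro rj req opt _ hpre
  unfold Spec_valid_request_json
  cases rj with
  | none => rfl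
  | some pairs =>
    have hpre' := hpre pairs rfl
    set d := PySem.Dict.ofList pairs with hd
    have hkeys : d.keys = PySem.Set.ofList (pairs.map Prod.fst) := vrj_keys_ofList pairs
    have hndk : d.keys.Nodup := PySem.Dict.nodup_keys_ofList pairs
    -- a key is in the dict iff it is in the original key list
    have hcont : ∀ x, d.contains x = true ↔ x ∈ pairs.map Prod.fst := by
      intro x
      rw [PySem.Dict.contains_eq_decide_mem_keys, hkeys]
      simp [PySem.Set.mem_ofList]
    -- takeWhile hypothesis transferred to d.contains
    have hpre'' : (req.takeWhile (fun k => d.contains k)).Nodup := by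
      have : (fun k => d.contains k) = (fun k => (pairs.map Prod.fst).contains k) := by
        funext k
        rw [Bool.eq_iff_iff, hcont, vrj_contains_iff]
      rw [this]; exact hpre'
    have hloop := vrjLoop_eq d req [] (by simpa using hpre'')
    simp only [List.nil_append] at hloop
    have hitems : d.items.filter (fun p => !([] : List String).contains p.1) = d.items := by
      simp
    rw [hitems] at hloop
    -- the popped copy
    set copy := PySem.Dict.mk (d.items.filter (fun p => !req.contains p.1)) with hcopy
    have hA : valid_request_json (some pairs) req opt =
        (if req.all (fun k => d.contains k)
         then (if 1 ≤ opt.length ∧ copy.size > opt.length then false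
               else copy.keys.all (fun rkey => opt.contains rkey))
         else false) := by
      show (match vrjLoop d req d with
            | none => false
            | some none => false
            | some (some copy_json) =>
              if 1 ≤ opt.length ∧ copy_json.size > opt.length then false
              else copy_json.keys.all (fun rkey => opt.contains rkey)) = _
      rw [hloop]
      by_cases hall : req.all (fun k => d.contains k) = true
      · rw [if_pos hall, if_pos hall]
      · rw [if_neg hall, if_neg hall]
    have hB : valid_request_json_alt (some pairs) req opt =
        (PySem.Set.issubset (PySem.Set.ofList req) (PySem.Set.ofList (pairs.map Prod.fst)) &&
         PySem.Set.issubset (PySem.Set.ofList (pairs.map Prod.fst))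
           (PySem.Set.union (PySem.Set.ofList req) (PySem.Set.ofList opt))) := rfl
    rw [hA, hB]
    by_cases hall : req.all (fun k => d.contains k) = true
    · -- all required keys present on both sides
      have halt1 : PySem.Set.issubset (PySem.Set.ofList req) (PySem.Set.ofList (pairs.map Prod.fst)) = true := by
        simp only [PySem.Set.issubset, PySem.Set.contains, List.all_eq_true]
        intro x hx
        rw [vrj_contains_iff, PySem.Set.mem_ofList]
        have hx' : x ∈ req := (PySem.Set.mem_ofList req x).mp hx
        exact (hcont x).mp (List.all_eq_true.mp hall x hx')
      have hck : copy.keys = d.keys.filter (fun k => !req.contains k) := by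
        rw [hcopy]
        have := vrj_keys_filter d.items (fun k => !req.contains k)
        simpa [PySem.Dict.keys] using this
      -- A's final membership loop equals B's second inclusion, given hall
      have hfin : (copy.keys.all (fun rkey => opt.contains rkey)) =
          PySem.Set.issubset (PySem.Set.ofList (pairs.map Prod.fst))
            (PySem.Set.union (PySem.Set.ofList req) (PySem.Set.ofList opt)) := by
        rw [Bool.eq_iff_iff]
        simp only [PySem.Set.issubset, List.all_eq_true, PySem.Set.contains]
        constructor
        · intro h x hx
          rw [vrj_contains_iff]
          have hx' : x ∈ pairs.map Prod.fst := (PySem.Set.mem_ofList _ x).mp hx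
          by_cases hxr : x ∈ req
          · exact (PySem.Set.mem_union _ _ x).mpr (Or.inl ((PySem.Set.mem_ofList req x).mpr hxr))
          · have hxk : x ∈ copy.keys := by
              rw [hck, List.mem_filter]
              refine ⟨by rw [hkeys]; exact (PySem.Set.mem_ofList _ x).mpr hx', ?_⟩
              simp [hxr]
            have := h x hxk
            rw [vrj_contains_iff] at this
            exact (PySem.Set.mem_union _ _ x).mpr (Or.inr ((PySem.Set.mem_ofList opt x).mpr this))
        · intro h x hx
          rw [vrj_contains_iff]
          rw [hck, List.mem_filter] at hx
          obtain ⟨hxk, hxr⟩ := hx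
          have hx' : x ∈ PySem.Set.ofList (pairs.map Prod.fst) := by rw [← hkeys]; exact hxk
          have := h x hx'
          rw [vrj_contains_iff, PySem.Set.mem_union] at this
          rcases this with hl | hr
          · exfalso
            have : x ∈ req := (PySem.Set.mem_ofList req x).mp hl
            simp [this] at hxr
          · exact (PySem.Set.mem_ofList opt x).mp hr
      -- the length guard never rejects an input the final loop accepts
      have hguard : ∀ (h1 : 1 ≤ opt.length) (h2 : copy.size > opt.length),
          copy.keys.all (fun rkey => opt.contains rkey) = false := by
        intro _ h2
        by_contra hne
        have hallk : copy.keys.all (fun rkey => opt.contains rkey) = true := by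
          cases h : copy.keys.all (fun rkey => opt.contains rkey) with
          | false => exact absurd h hne
          | true => rfl
        have hsub : copy.keys ⊆ opt := by
          intro x hx
          have := List.all_eq_true.mp hallk x hx
          exact (vrj_contains_iff opt x).mp this
        have hndc : copy.keys.Nodup := by
          rw [hck]; exact hndk.filter _
        have hlen : copy.keys.length ≤ opt.length :=
          (hndc.subperm hsub).length_le
        have hsz : copy.size = copy.keys.length := by
          simp [PySem.Dict.size, PySem.Dict.keys]
        omega
      rw [if_pos hall, halt1, Bool.true_and]
      split_ifs with hg
      · rw [← hfin, hguard hg.1 hg.2]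
      · exact hfin
    · -- some required key missing: both sides false
      have : PySem.Set.issubset (PySem.Set.ofList req) (PySem.Set.ofList (pairs.map Prod.fst)) = false := by
        rw [Bool.eq_false_iff]
        intro hsub
        apply hall
        rw [List.all_eq_true]
        intro x hx
        have := List.all_eq_true.mp hsub x ((PySem.Set.mem_ofList req x).mpr hx)
        rw [PySem.Set.contains, vrj_contains_iff, PySem.Set.mem_ofList] at this
        exact (hcont x).mpr this
      rw [if_neg hall, this, Bool.false_and]

@[simp] theorem valid_request_json_raises : Claim_raises_valid_request_json := by
  unfold Claim_raises_valid_request_json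
  constructor
  · intro rj req opt _ hr hpre
    obtain ⟨pairs, hps, hnd⟩ := hr
    exact hnd (hpre pairs hps)
  · exact ⟨by decide, ⟨[("a", 1)], rfl, by decide⟩, by decide⟩
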